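-- pv_equiv track=rewrite | github.com/vobiz-ai/Vobiz-Python-XML | agent.py | _linear_to_mulaw
-- ===== SOURCE A (Python) =====
-- def _linear_to_mulaw(sample: int) -> int:
--     """Convert a 16-bit signed PCM sample to 8-bit μ-law."""
--     MULAW_MAX = 0x1FFF
--     MULAW_BIAS = 33
--     sign = 0
--     if sample < 0:
--         sign = 0x80
--         sample = -sample
--     sample = min(sample + MULAW_BIAS, MULAW_MAX)
--     exponent = 7
--     for exp_val in [0x4000, 0x2000, 0x1000, 0x0800, 0x0400, 0x0200, 0x0100]:
--         if sample >= exp_val: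
--             break
--         exponent -= 1
--     mantissa = (sample >> (exponent + 3)) & 0x0F
--     mulaw_byte = ~(sign | (exponent << 4) | mantissa) & 0xFF
--     return mulaw_byte
-- ===== SOURCE B (Python) =====
-- def _linear_to_mulaw(sample: int) -> int:
--     """Convert a 16-bit signed PCM sample to 8-bit mu-law (closed-form exponent)."""
--     sign = 0x80 if sample < 0 else 0
--     s = min(abs(sample) + 33, 0x1FFF)
--     exponent = max(0, s.bit_length() - 8)
--     mantissa = (s >> (exponent + 3)) & 0x0F
--     return ~(sign | (exponent << 4) | mantissa) & 0xFF
-- ===== Notes on version B (the rewrite author's own statement) =====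
-- stated objective: simpler
-- what changed: The iterative threshold scan that finds the mu-law exponent is replaced by a closed form computed from the clamped sample's bit length; sign handling, bias/clamp and byte assembly are unchanged.
import Mathlib
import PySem

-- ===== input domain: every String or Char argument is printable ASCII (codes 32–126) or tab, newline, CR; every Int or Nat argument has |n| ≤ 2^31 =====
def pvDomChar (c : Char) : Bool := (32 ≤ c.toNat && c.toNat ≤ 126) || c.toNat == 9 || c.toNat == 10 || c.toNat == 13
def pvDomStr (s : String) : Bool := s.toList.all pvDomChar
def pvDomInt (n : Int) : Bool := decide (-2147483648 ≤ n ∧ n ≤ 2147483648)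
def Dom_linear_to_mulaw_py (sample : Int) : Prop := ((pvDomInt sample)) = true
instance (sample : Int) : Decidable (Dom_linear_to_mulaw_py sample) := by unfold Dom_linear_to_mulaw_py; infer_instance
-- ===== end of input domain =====

-- B replaces A's 7-step threshold scan by the closed-form exponent max(0, bit_length - 8); simpler, same value everywhere.

-- ===== PORT A =====
-- A's for-loop with break: exponent starts at 7, decremented once per threshold not reached.
def pvScanExp (sample : Int) : List Int → Int → Int
  | [], e => e
  | v :: rest, e => if sample ≥ v then e else pvScanExp sample rest (e - 1)

def linear_to_mulaw_py (sample : Int) : Int :=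
  let sign : Int := if sample < 0 then 0x80 else 0
  let s1 : Int := if sample < 0 then -sample else sample
  let s : Int := min (s1 + 33) 0x1FFF
  let exponent : Int := pvScanExp s [0x4000, 0x2000, 0x1000, 0x0800, 0x0400, 0x0200, 0x0100] 7
  -- shift amount exponent+3 is a nonnegative Int; Lean's >>> takes a Nat, so .toNat (exact here)
  let mantissa : Int := PySem.Int.band (s >>> (exponent + 3).toNat) 0x0F
  PySem.Int.band (Int.not (PySem.Int.bor sign (PySem.Int.bor (exponent <<< (4 : Nat)) mantissa))) 0xFF

-- ===== PORT B =====
def linear_to_mulaw_py_alt (sample : Int) : Int :=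
  let sign : Int := if sample < 0 then 0x80 else 0
  let s : Int := min (|sample| + 33) 0x1FFF
  let exponent : Int := max 0 ((PySem.Int.bitLength s : Int) - 8)
  let mantissa : Int := PySem.Int.band (s >>> (exponent + 3).toNat) 0x0F
  PySem.Int.band (Int.not (PySem.Int.bor sign (PySem.Int.bor (exponent <<< (4 : Nat)) mantissa))) 0xFF

-- ===== PRECONDITION & SPEC =====
def Spec_linear_to_mulaw_py (sample : Int) (out : Int) : Prop := out = linear_to_mulaw_py_alt sample
instance (sample : Int) (out : Int) : Decidable (Spec_linear_to_mulaw_py sample out) := by unfold Spec_linear_to_mulaw_py; infer_instance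

-- ===== CLAIM (what is proved, stated in full; the proofs are below) =====
def Claim_equal_linear_to_mulaw_py : Prop := ∀ (sample : Int), Dom_linear_to_mulaw_py sample → Spec_linear_to_mulaw_py sample (linear_to_mulaw_py sample)

-- ===== LEMMAS AND PROOFS =====

-- bitLength is determined by a power-of-two sandwich
lemma pv_bl_eq (n : Int) (k : Nat) (h1 : (2 : Int) ^ k ≤ n) (h2 : n < 2 ^ (k + 1)) :
    PySem.Int.bitLength n = k + 1 := by
  have hn : 0 < n := lt_of_lt_of_le (by positivity) h1
  have hub := PySem.Int.lt_two_pow_bitLength n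
  have hlb := PySem.Int.two_pow_bitLength_le n (by omega)
  set bl := PySem.Int.bitLength n with hbl
  have hcast : (n.natAbs : Int) = n := Int.natAbs_of_nonneg (le_of_lt hn)
  have h1' : 2 ^ k ≤ n.natAbs := by
    have : (2 : Int) ^ k ≤ (n.natAbs : Int) := by rw [hcast]; exact h1
    exact_mod_cast this
  have h2' : n.natAbs < 2 ^ (k + 1) := by
    have : (n.natAbs : Int) < (2 : Int) ^ (k + 1) := by rw [hcast]; exact h2
    exact_mod_cast this
  have hle : bl ≤ k + 1 := by
    by_contra h
    have hk : k + 1 ≤ bl - 1 := by omega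
    have := Nat.pow_le_pow_right (show 1 ≤ 2 by norm_num) hk
    omega
  have hge : k + 1 ≤ bl := by
    by_contra h
    have hk : bl ≤ k := by omega
    have := Nat.pow_le_pow_right (show 1 ≤ 2 by norm_num) hk
    omega
  omega

-- the 7-step threshold scan equals the closed-form exponent on the clamped range
lemma pv_exp_eq (s : Int) (h1 : 33 ≤ s) (h2 : s ≤ 0x1FFF) :
    pvScanExp s [0x4000, 0x2000, 0x1000, 0x0800, 0x0400, 0x0200, 0x0100] 7
      = max 0 ((PySem.Int.bitLength s : Int) - 8) := by
  simp only [pvScanExp]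
  split_ifs with a1 a2 a3 a4 a5 a6 a7
  · omega
  · omega
  · rw [pv_bl_eq s 12 (by norm_num; omega) (by norm_num; omega)]; norm_num
  · rw [pv_bl_eq s 11 (by norm_num; omega) (by norm_num; omega)]; norm_num
  · rw [pv_bl_eq s 10 (by norm_num; omega) (by norm_num; omega)]; norm_num
  · rw [pv_bl_eq s 9 (by norm_num; omega) (by norm_num; omega)]; norm_num
  · rw [pv_bl_eq s 8 (by norm_num; omega) (by norm_num; omega)]; norm_num
  · -- s < 256 : bitLength ≤ 8, so closed form is 0 and the scan finished at 0
    have hlb := PySem.Int.two_pow_bitLength_le s (by omega)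
    set bl := PySem.Int.bitLength s
    have hble : bl ≤ 8 := by
      by_contra h
      have : 8 ≤ bl - 1 := by omega
      have := Nat.pow_le_pow_right (show 1 ≤ 2 by norm_num) this
      omega
    omega

-- ===== VERDICT (by name: the statement is the Claim_ definition above) =====
theorem linear_to_mulaw_py_spec : Claim_equal_linear_to_mulaw_py := by
  intro sample _
  unfold Spec_linear_to_mulaw_py linear_to_mulaw_py linear_to_mulaw_py_alt
  have habs : (if sample < 0 then -sample else sample) = |sample| := by
    split_ifs with h
    · exact (abs_of_neg h).symm
    · exact (abs_of_nonneg (by omega)).symm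
  have hexp := pv_exp_eq (min (|sample| + 33) 0x1FFF)
    (by have := abs_nonneg sample; omega) (by omega)
  simp only [habs, hexp]
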